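-- pv_equiv track=rewrite | github.com/vikramk100/CumminsAIAgent | api/dispatch_agent.py | _fallback_suggest_categories
-- ===== SOURCE A (Python) =====
-- def _fallback_suggest_categories(issue_description: str) -> list[str]:
--     """Rule-based category suggestions when Gemini is unavailable."""
--     t = (issue_description or "").lower()
--     out = []
--     if any(x in t for x in ["engine", "overheat", "temperature"]):
--         out.append("Engine")
--     if any(x in t for x in ["coolant", "cooling", "radiator"]):
--         out.append("Cooling")
--     if any(x in t for x in ["electr", "sensor", "wire", "battery"]):
--         out.append("Electrical")
--     if any(x in t for x in ["fuel", "injector", "tank"]):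
--         out.append("Fuel System")
--     if any(x in t for x in ["exhaust", "emission"]):
--         out.append("Exhaust")
--     if any(x in t for x in ["belt", "hose", "filter"]):
--         out.extend(["Belts", "Filters"])
--     return out if out else ["Engine", "General"]
-- ===== SOURCE B (Python) =====
-- # Multi-pattern single sweep: scan the text position by position, flagging the
-- # category of every keyword that starts there, then emit categories in rank order.
-- _KEYWORD_CATEGORY = [
--     ("engine", 0), ("overheat", 0), ("temperature", 0),
--     ("coolant", 1), ("cooling", 1), ("radiator", 1),
--     ("electr", 2), ("sensor", 2), ("wire", 2), ("battery", 2),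
--     ("fuel", 3), ("injector", 3), ("tank", 3),
--     ("exhaust", 4), ("emission", 4),
--     ("belt", 5), ("hose", 5), ("filter", 5),
-- ]
-- _CATEGORY_OUTPUT = [["Engine"], ["Cooling"], ["Electrical"],
--                     ["Fuel System"], ["Exhaust"], ["Belts", "Filters"]]
--
--
-- def _scan(t):
--     """One sweep over the text: the set of category ids whose keyword starts somewhere."""
--     found = set()
--     for j in range(len(t)):
--         for kw, cat in _KEYWORD_CATEGORY:
--             if t.startswith(kw, j):
--                 found.add(cat)
--     return found
--
--
-- def _fallback_suggest_categories(issue_description: str) -> list[str]: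
--     """Rule-based category suggestions when Gemini is unavailable."""
--     found = _scan((issue_description or "").lower())
--     out = [name for cat in range(6) if cat in found
--            for name in _CATEGORY_OUTPUT[cat]]
--     return out or ["Engine", "General"]
-- ===== Notes on version B (the rewrite author's own statement) =====
-- stated objective: alternative
-- what changed: Replaces six per-keyword substring tests by one sweep over the text positions that prefix-matches a flat keyword->category table and collects hit categories in a set, then emits categories in rank order.
import Mathlib
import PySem

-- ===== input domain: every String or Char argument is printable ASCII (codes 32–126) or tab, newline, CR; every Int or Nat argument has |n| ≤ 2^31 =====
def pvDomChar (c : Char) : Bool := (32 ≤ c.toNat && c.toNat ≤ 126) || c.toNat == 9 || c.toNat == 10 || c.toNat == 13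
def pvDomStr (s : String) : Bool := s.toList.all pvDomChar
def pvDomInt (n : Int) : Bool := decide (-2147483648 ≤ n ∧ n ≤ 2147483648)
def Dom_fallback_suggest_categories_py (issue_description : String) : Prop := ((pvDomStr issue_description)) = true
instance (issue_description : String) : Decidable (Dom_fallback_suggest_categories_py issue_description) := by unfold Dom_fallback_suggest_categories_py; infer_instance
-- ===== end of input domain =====

-- B replaces A's six per-keyword substring branches by one sweep over text positions that
-- prefix-matches a flat keyword->category table into a set, then emits categories in rank order.


-- ===== PORT A =====
def fallback_suggest_categories_py (issue_description : String) : List String :=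
  let t := PySem.Str.lower issue_description
  let out : List String := []
  let out := if ["engine", "overheat", "temperature"].any (fun x => PySem.Str.isIn x t) then out ++ ["Engine"] else out
  let out := if ["coolant", "cooling", "radiator"].any (fun x => PySem.Str.isIn x t) then out ++ ["Cooling"] else out
  let out := if ["electr", "sensor", "wire", "battery"].any (fun x => PySem.Str.isIn x t) then out ++ ["Electrical"] else out
  let out := if ["fuel", "injector", "tank"].any (fun x => PySem.Str.isIn x t) then out ++ ["Fuel System"] else out
  let out := if ["exhaust", "emission"].any (fun x => PySem.Str.isIn x t) then out ++ ["Exhaust"] else out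
  let out := if ["belt", "hose", "filter"].any (fun x => PySem.Str.isIn x t) then out ++ ["Belts", "Filters"] else out
  if out.isEmpty then ["Engine", "General"] else out

-- ===== PORT B =====
def pvKeywordCat : List (List Char × Nat) :=
  [("engine".toList, 0), ("overheat".toList, 0), ("temperature".toList, 0),
   ("coolant".toList, 1), ("cooling".toList, 1), ("radiator".toList, 1),
   ("electr".toList, 2), ("sensor".toList, 2), ("wire".toList, 2), ("battery".toList, 2),
   ("fuel".toList, 3), ("injector".toList, 3), ("tank".toList, 3),
   ("exhaust".toList, 4), ("emission".toList, 4),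
   ("belt".toList, 5), ("hose".toList, 5), ("filter".toList, 5)]

def pvCatOut : List (List String) :=
  [["Engine"], ["Cooling"], ["Electrical"], ["Fuel System"], ["Exhaust"], ["Belts", "Filters"]]

-- _scan: one sweep over the positions of t; t.startswith(kw, j) is exact as
-- PySem.Chars.startswith (t.drop j) kw for 0 ≤ j ≤ len t, and range(len(t)) is List.range t.length.
def pvScan (t : List Char) : PySem.Set Nat :=
  (List.range t.length).foldl
    (fun found j =>
      pvKeywordCat.foldl
        (fun found kc =>
          if PySem.Chars.startswith (t.drop j) kc.1 then PySem.Set.add found kc.2 else found)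
        found)
    PySem.Set.empty

def fallback_suggest_categories_py_alt (issue_description : String) : List String :=
  let found := pvScan (PySem.Chars.lower issue_description.toList)
  -- the comprehension: for cat in range(6), if cat in found, extend by _CATEGORY_OUTPUT[cat] (always in range)
  let out := (List.range 6).foldl
    (fun out cat => if PySem.Set.contains found cat then out ++ pvCatOut.getD cat [] else out) []
  if out.isEmpty then ["Engine", "General"] else out

-- ===== PRECONDITION & SPEC =====
def Spec_fallback_suggest_categories_py (issue_description : String) (out : List String) : Prop := out = fallback_suggest_categories_py_alt issue_description
instance (issue_description : String) (out : List String) : Decidable (Spec_fallback_suggest_categories_py issue_description out) := by unfold Spec_fallback_suggest_categories_py; infer_instance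

-- ===== CLAIM (what is proved, stated in full; the proofs are below) =====
def Claim_equal_fallback_suggest_categories_py : Prop := ∀ (issue_description : String), Dom_fallback_suggest_categories_py issue_description → Spec_fallback_suggest_categories_py issue_description (fallback_suggest_categories_py issue_description)

-- ===== LEMMAS AND PROOFS =====

-- membership through the inner fold over the keyword table
lemma mem_inner_fold (t : List Char) (j : Nat) (s : PySem.Set Nat) (c : Nat) (l : List (List Char × Nat)) :
    c ∈ l.foldl (fun found kc =>
          if PySem.Chars.startswith (t.drop j) kc.1 then PySem.Set.add found kc.2 else found) s
      ↔ c ∈ s ∨ ∃ kc ∈ l, PySem.Chars.startswith (t.drop j) kc.1 = true ∧ kc.2 = c := by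
  induction l generalizing s with
  | nil => simp
  | cons kc l ih =>
    simp only [List.foldl_cons, ih]
    by_cases h : PySem.Chars.startswith (t.drop j) kc.1 = true
    · simp only [h, if_true, PySem.Set.mem_add, List.exists_mem_cons_iff, true_and]
      rw [show (c = kc.2) ↔ (kc.2 = c) from eq_comm]
      exact or_assoc
    · simp [h]

-- membership through the outer fold over the positions
lemma mem_pvScan (t : List Char) (c : Nat) :
    c ∈ pvScan t ↔ ∃ j, j < t.length ∧
      ∃ kc ∈ pvKeywordCat, PySem.Chars.startswith (t.drop j) kc.1 = true ∧ kc.2 = c := by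
  unfold pvScan
  have key : ∀ (L : List Nat) (s : PySem.Set Nat),
      c ∈ L.foldl (fun found j =>
            pvKeywordCat.foldl (fun found kc =>
              if PySem.Chars.startswith (t.drop j) kc.1 then PySem.Set.add found kc.2 else found)
              found) s
        ↔ c ∈ s ∨ ∃ j ∈ L, ∃ kc ∈ pvKeywordCat,
            PySem.Chars.startswith (t.drop j) kc.1 = true ∧ kc.2 = c := by
    intro L
    induction L with
    | nil => simp
    | cons j L ih =>
      intro s
      simp only [List.foldl_cons, ih, mem_inner_fold, List.exists_mem_cons_iff]
      exact or_assoc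
  rw [key]
  simp [PySem.Set.empty, List.mem_range]

-- a nonempty keyword starts at some scanned position iff it is a substring
lemma exists_start_iff (kw t : List Char) (h : kw ≠ []) :
    (∃ j, j < t.length ∧ PySem.Chars.startswith (t.drop j) kw = true)
      ↔ PySem.Chars.isIn kw t = true := by
  rw [← PySem.Chars.exists_prefix_drop_iff_isIn]
  constructor
  · rintro ⟨j, _, hs⟩
    exact ⟨j, (PySem.Chars.startswith_iff _ _).1 hs⟩
  · rintro ⟨j, hp⟩
    by_cases hj : j < t.length
    · exact ⟨j, hj, (PySem.Chars.startswith_iff _ _).2 hp⟩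
    · exfalso
      have hd : t.drop j = [] := List.drop_eq_nil_of_le (le_of_not_gt hj)
      rw [hd] at hp
      exact h (List.prefix_nil.mp hp)

lemma kw_ne_nil : ∀ kc ∈ pvKeywordCat, kc.1 ≠ [] := by decide

-- the scanned set answers exactly A's per-category "any keyword is a substring" test
lemma contains_pvScan (t : List Char) (c : Nat) :
    PySem.Set.contains (pvScan t) c =
      (pvKeywordCat.filter (fun kc => kc.2 == c)).any (fun kc => PySem.Chars.isIn kc.1 t) := by
  rw [Bool.eq_iff_iff]
  rw [PySem.Set.contains_iff, mem_pvScan, List.any_eq_true]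
  constructor
  · rintro ⟨j, hj, kc, hkc, hsw, hc⟩
    refine ⟨kc, List.mem_filter.mpr ⟨hkc, by simp [hc]⟩, ?_⟩
    exact (exists_start_iff kc.1 t (kw_ne_nil kc hkc)).1 ⟨j, hj, hsw⟩
  · rintro ⟨kc, hkc, hin⟩
    obtain ⟨hmem, hc⟩ := List.mem_filter.mp hkc
    obtain ⟨j, hj, hsw⟩ := (exists_start_iff kc.1 t (kw_ne_nil kc hmem)).2 hin
    exact ⟨j, hj, kc, hmem, hsw, by simpa using hc⟩

-- ===== VERDICT (by name: the statement is the Claim_ definition above) =====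
theorem fallback_suggest_categories_py_spec : Claim_equal_fallback_suggest_categories_py := by
  intro s _
  unfold Spec_fallback_suggest_categories_py
  unfold fallback_suggest_categories_py fallback_suggest_categories_py_alt
  simp only [show List.range 6 = [0, 1, 2, 3, 4, 5] from rfl, List.foldl_cons, List.foldl_nil,
    contains_pvScan, pvKeywordCat, pvCatOut]
  simp [PySem.Str.isIn, PySem.Str.lower, List.any, List.filter]
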